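-- pv_equiv track=rewrite | github.com/sakettamrakar/TraderFund | automation/diff_applier.py | _extract_and_split
-- ===== SOURCE A (Python) =====
-- def _extract_and_split(raw: str) -> list[tuple[str, str]]:
--     """Extract diff content, strip markdown, and split into per-file patches.
--     Returns list of (filepath, patch_text) tuples."""
--     lines = raw.splitlines()
--     # Strip markdown fences
--     clean = []
--     for line in lines:
--         if line.strip().startswith("```"):
--             continue
--         clean.append(line)
--
--     # Split into per-file segments at "--- a/" boundaries
--     segments: list[list[str]] = []
--     current: list[str] = []
--
--     for line in clean:
--         if line.startswith("--- a/") or line.strip().startswith("--- a/"):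
--             if current:
--                 segments.append(current)
--             current = []
--             # Inject diff --git header
--             path = line.strip()[6:]
--             current.append(f"diff --git a/{path} b/{path}")
--             current.append(line)
--         elif line.startswith("diff --git"):
--             if current:
--                 segments.append(current)
--             current = [line]
--         else:
--             current.append(line)
--
--     if current:
--         segments.append(current)
--
--     # Build per-file patches
--     results = []
--     for seg in segments:
--         text = "\n".join(seg) + "\n"
--         # Extract file path
--         path = ""
--         for l in seg:
--             if l.startswith("+++ b/") or l.strip().startswith("+++ b/"):
--                 path = l.strip()[6:]
--                 break
--         if path:
--             results.append((path, text))
--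
--     return results
-- ===== SOURCE B (Python) =====
-- def _extract_and_split(raw: str) -> list[tuple[str, str]]:
--     """Extract diff content, strip markdown, and split into per-file patches.
--     Index-table + slicing decomposition: record boundary positions once, then
--     cut the cleaned line list into segments between consecutive boundaries."""
--     clean = [ln for ln in raw.splitlines() if not ln.strip().startswith("```")]
--     bounds = [i for i, ln in enumerate(clean)
--               if ln.strip().startswith("--- a/") or ln.startswith("diff --git")]
--     cuts = bounds + [len(clean)]
--     head = clean[:cuts[0]]          # lines before the first boundary (cuts is never empty)
--     segments = [head] if head else []
--     for b, e in zip(cuts, cuts[1:]):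
--         ln = clean[b]
--         if ln.strip().startswith("--- a/"):
--             path = ln.strip()[6:]
--             segments.append([f"diff --git a/{path} b/{path}"] + clean[b:e])
--         else:
--             segments.append(clean[b:e])
--     results = []
--     for seg in segments:
--         path = next((l.strip()[6:] for l in seg if l.strip().startswith("+++ b/")), "")
--         if path:
--             results.append((path, "\n".join(seg) + "\n"))
--     return results
-- ===== Notes on version B (the rewrite author's own statement) =====
-- stated objective: alternative
-- what changed: Replaces A's stateful emit-on-boundary loop with a running accumulator buffer by an index-table-then-slice decomposition: one pass records all boundary-line indices, then the cleaned line list is sliced between consecutive boundaries and each slice reconstructed (synthetic 'diff --git' header prepended for '--- a/' boundaries).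
import Mathlib
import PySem

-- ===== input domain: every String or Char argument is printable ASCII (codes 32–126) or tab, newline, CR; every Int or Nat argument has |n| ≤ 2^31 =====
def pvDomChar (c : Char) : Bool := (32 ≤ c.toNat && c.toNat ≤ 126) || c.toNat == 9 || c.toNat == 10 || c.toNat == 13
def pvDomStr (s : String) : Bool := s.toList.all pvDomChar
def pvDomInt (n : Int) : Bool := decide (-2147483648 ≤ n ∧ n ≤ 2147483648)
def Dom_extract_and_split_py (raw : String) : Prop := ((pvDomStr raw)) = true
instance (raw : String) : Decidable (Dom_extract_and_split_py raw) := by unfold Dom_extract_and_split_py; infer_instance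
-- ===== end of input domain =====

-- B replaces A's stateful emit-on-boundary accumulator with an index-table-then-slice decomposition
-- (record boundary positions once, then cut the cleaned line list between consecutive boundaries).

-- ===== PORT A =====
-- state: (segments, current); one iteration of A's splitting loop
def pvA_step (st : List (List String) × List String) (line : String) :
    List (List String) × List String :=
  if PySem.Str.startswith line "--- a/" ||
      PySem.Str.startswith (PySem.Str.strip line) "--- a/" then
    let segs := if st.2 ≠ [] then st.1 ++ [st.2] else st.1
    let path := PySem.Str.slice (PySem.Str.strip line) (some 6) none
    (segs, [PySem.Str.join "" ["diff --git a/", path, " b/", path], line])  -- f"diff --git a/{path} b/{path}"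
  else if PySem.Str.startswith line "diff --git" then
    ((if st.2 ≠ [] then st.1 ++ [st.2] else st.1), [line])
  else
    (st.1, st.2 ++ [line])

-- 'for l in seg: if …: path = …; break' starting from path = ""
def pvA_path : List String → String
  | [] => ""
  | l :: rest =>
    if PySem.Str.startswith l "+++ b/" ||
        PySem.Str.startswith (PySem.Str.strip l) "+++ b/" then
      PySem.Str.slice (PySem.Str.strip l) (some 6) none
    else pvA_path rest

def extract_and_split_py (raw : String) : List (String × String) :=
  let lines := PySem.Str.splitlines raw
  let clean := lines.foldl (fun acc line =>
    if PySem.Str.startswith (PySem.Str.strip line) "```" then acc else acc ++ [line]) []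
  let st := clean.foldl pvA_step ([], [])
  let segments := if st.2 ≠ [] then st.1 ++ [st.2] else st.1
  segments.foldl (fun results seg =>
    let text := PySem.Str.join "" [PySem.Str.join "\n" seg, "\n"]  -- "\n".join(seg) + "\n"
    let path := pvA_path seg
    if path ≠ "" then results ++ [(path, text)] else results) []

-- ===== PORT B =====
def pvB_isBoundary (ln : String) : Bool :=
  PySem.Str.startswith (PySem.Str.strip ln) "--- a/" ||
    PySem.Str.startswith ln "diff --git"

def pvB_header (path : String) : String :=
  PySem.Str.join "" ["diff --git a/", path, " b/", path]

-- next((l.strip()[6:] for l in seg if l.strip().startswith("+++ b/")), "")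
def pvB_path (seg : List String) : String :=
  ((seg.find? fun l => PySem.Str.startswith (PySem.Str.strip l) "+++ b/").map
      fun l => PySem.Str.slice (PySem.Str.strip l) (some 6) none).getD ""

def extract_and_split_py_alt (raw : String) : List (String × String) :=
  let clean := (PySem.Str.splitlines raw).filter fun ln =>
    !PySem.Str.startswith (PySem.Str.strip ln) "```"
  let bounds := ((PySem.List.enumerate clean 0).filter fun p => pvB_isBoundary p.2).map (·.1)
  let cuts := bounds ++ [(clean.length : Int)]
  let head := PySem.List.slice clean none (some (cuts.headD 0))  -- clean[:cuts[0]]; cuts is nonempty by construction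
  let segments := (if head ≠ [] then [head] else []) ++
    (List.zip cuts cuts.tail).foldl (fun segs p =>              -- zip(cuts, cuts[1:])
      let ln := (PySem.List.pyGet? clean p.1).getD ""           -- clean[b]; b is an index of clean by construction
      if PySem.Str.startswith (PySem.Str.strip ln) "--- a/" then
        let path := PySem.Str.slice (PySem.Str.strip ln) (some 6) none
        segs ++ [pvB_header path :: PySem.List.slice clean (some p.1) (some p.2)]
      else
        segs ++ [PySem.List.slice clean (some p.1) (some p.2)]) []
  segments.foldl (fun results seg =>
    let path := pvB_path seg
    if path ≠ "" then
      results ++ [(path, PySem.Str.join "" [PySem.Str.join "\n" seg, "\n"])]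
    else results) []

-- ===== PRECONDITION & SPEC =====
def Spec_extract_and_split_py (raw : String) (out : List (String × String)) : Prop := out = extract_and_split_py_alt raw
instance (raw : String) (out : List (String × String)) : Decidable (Spec_extract_and_split_py raw out) := by unfold Spec_extract_and_split_py; infer_instance

-- ===== CLAIM (what is proved, stated in full; the proofs are below) =====
def Claim_equal_extract_and_split_py : Prop := ∀ (raw : String), Dom_extract_and_split_py raw → Spec_extract_and_split_py raw (extract_and_split_py raw)

-- ===== LEMMAS AND PROOFS =====

-- a prefix whose first and last characters are not whitespace survives strip()
theorem pv_dropWhile_append_cons {α : Type} (p : α → Bool) (a b : List α) (x : α)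
    (hx : p x = false) :
    List.dropWhile p (a ++ x :: b) = List.dropWhile p a ++ x :: b := by
  induction a with
  | nil => simp [List.dropWhile, hx]
  | cons y a ih =>
    cases hy : p y with
    | true => simp [List.dropWhile, hy, ih]
    | false => simp [List.dropWhile, hy]

theorem pv_strip_startswith (s pre : List Char) (c z : Char) (mid : List Char)
    (hpre : pre = c :: mid ++ [z])
    (hc : PySem.Chars.isspace c = false) (hz : PySem.Chars.isspace z = false)
    (h : PySem.Chars.startswith s pre = true) :
    PySem.Chars.startswith (PySem.Chars.strip s) pre = true := by
  rw [PySem.Chars.startswith_iff] at h ⊢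
  obtain ⟨t, rfl⟩ := h
  subst hpre
  have hl : PySem.Chars.lstrip ((c :: mid ++ [z]) ++ t) = (c :: mid ++ [z]) ++ t := by
    simp [PySem.Chars.lstrip, List.dropWhile, hc]
  unfold PySem.Chars.strip
  rw [hl]
  unfold PySem.Chars.rstrip
  have : ((c :: mid ++ [z]) ++ t).reverse = t.reverse ++ z :: (mid.reverse ++ [c]) := by
    simp
  rw [this, pv_dropWhile_append_cons _ _ _ _ hz]
  refine ⟨(List.dropWhile PySem.Chars.isspace t.reverse).reverse, ?_⟩
  simp

-- the two "--- a/" tests of A collapse to the stripped one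
theorem pv_dash_or (l : String) :
    (PySem.Str.startswith l "--- a/" ||
      PySem.Str.startswith (PySem.Str.strip l) "--- a/") =
      PySem.Str.startswith (PySem.Str.strip l) "--- a/" := by
  cases hs : PySem.Str.startswith (PySem.Str.strip l) "--- a/"
  · cases hf : PySem.Str.startswith l "--- a/"
    · simp
    · exfalso
      rw [PySem.Str.startswith_eq] at hf hs
      rw [PySem.Str.toList_strip] at hs
      have := pv_strip_startswith l.toList "--- a/".toList '-' '/' "-- a".toList
        (by decide) (by decide) (by decide) hf
      rw [hs] at this
      exact Bool.false_ne_true this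
  · simp [hs]

-- the two "+++ b/" tests of A collapse to the stripped one
theorem pv_plus_or (l : String) :
    (PySem.Str.startswith l "+++ b/" ||
      PySem.Str.startswith (PySem.Str.strip l) "+++ b/") =
      PySem.Str.startswith (PySem.Str.strip l) "+++ b/" := by
  cases hs : PySem.Str.startswith (PySem.Str.strip l) "+++ b/"
  · cases hf : PySem.Str.startswith l "+++ b/"
    · simp
    · exfalso
      rw [PySem.Str.startswith_eq] at hf hs
      rw [PySem.Str.toList_strip] at hs
      have := pv_strip_startswith l.toList "+++ b/".toList '+' '/' "++ b".toList
        (by decide) (by decide) (by decide) hf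
      rw [hs] at this
      exact Bool.false_ne_true this
  · simp [hs]

-- not-a-boundary predicate (the segments' interior lines)
def pvNB (l : String) : Bool := !pvB_isBoundary l

-- the segment a boundary line b opens, with interior body
def pvMkSeg (b : String) (body : List String) : List String :=
  if PySem.Str.startswith (PySem.Str.strip b) "--- a/" then
    pvB_header (PySem.Str.slice (PySem.Str.strip b) (some 6) none) :: b :: body
  else b :: body

-- reference decomposition: segments of a line list whose head (if any) is a boundary
def pvSegTail : List String → List (List String)
  | [] => []
  | b :: rest =>
    pvMkSeg b (rest.takeWhile pvNB) :: pvSegTail (rest.dropWhile pvNB)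
termination_by ls => ls.length
decreasing_by
  simpa using Nat.lt_succ_of_le (List.length_dropWhile_le pvNB rest)

-- reference decomposition of an arbitrary cleaned line list
def pvSegSpec (ls : List String) : List (List String) :=
  (if ls.takeWhile pvNB = [] then [] else [ls.takeWhile pvNB]) ++ pvSegTail (ls.dropWhile pvNB)

-- ===== A's loop equals the reference decomposition =====
-- one step of A's loop, with the double "--- a/" test collapsed
theorem pvA_step_char (st : List (List String) × List String) (l : String) :
    pvA_step st l =
      if PySem.Str.startswith (PySem.Str.strip l) "--- a/" then
        ((if st.2 ≠ [] then st.1 ++ [st.2] else st.1),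
          [PySem.Str.join ""
            ["diff --git a/", PySem.Str.slice (PySem.Str.strip l) (some 6) none,
              " b/", PySem.Str.slice (PySem.Str.strip l) (some 6) none], l])
      else if PySem.Str.startswith l "diff --git" then
        ((if st.2 ≠ [] then st.1 ++ [st.2] else st.1), [l])
      else (st.1, st.2 ++ [l]) := by
  unfold pvA_step
  rw [pv_dash_or]

theorem pvA_loop_eq (ls : List String) : ∀ (segs : List (List String)) (cur : List String),
    (let st := ls.foldl pvA_step (segs, cur)
     if st.2 ≠ [] then st.1 ++ [st.2] else st.1) =
      segs ++ (if cur ++ ls.takeWhile pvNB = [] then [] else [cur ++ ls.takeWhile pvNB]) ++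
        pvSegTail (ls.dropWhile pvNB) := by
  induction ls with
  | nil =>
    intro segs cur
    cases cur <;> simp [pvSegTail]
  | cons l ls ih =>
    intro segs cur
    rw [List.foldl_cons, pvA_step_char]
    cases hd : PySem.Str.startswith (PySem.Str.strip l) "--- a/" with
    | true =>
      have hd' : PySem.Chars.startswith (PySem.Chars.strip l.toList) ['-', '-', '-', ' ', 'a', '/'] = true := by
        simpa using hd
      have hnb : pvNB l = false := by simp [pvNB, pvB_isBoundary, hd']
      rw [if_pos rfl, ih]
      rw [List.takeWhile_cons_of_neg (by simp [hnb]), List.dropWhile_cons_of_neg (by simp [hnb]),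
        pvSegTail]
      simp [pvMkSeg, hd', pvB_header]
      cases cur <;> simp
    | false =>
      cases hg : PySem.Str.startswith l "diff --git" with
      | true =>
        have hd' : PySem.Chars.startswith (PySem.Chars.strip l.toList) ['-', '-', '-', ' ', 'a', '/'] = false := by
          simpa using hd
        have hg' : PySem.Chars.startswith l.toList ['d', 'i', 'f', 'f', ' ', '-', '-', 'g', 'i', 't'] = true := by
          simpa using hg
        have hnb : pvNB l = false := by simp [pvNB, pvB_isBoundary, hg']
        simp only [Bool.false_eq_true, if_false, if_true]
        rw [ih]
        rw [List.takeWhile_cons_of_neg (by simp [hnb]), List.dropWhile_cons_of_neg (by simp [hnb]),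
          pvSegTail]
        simp [pvMkSeg, hd']
        cases cur <;> simp
      | false =>
        have hd' : PySem.Chars.startswith (PySem.Chars.strip l.toList) ['-', '-', '-', ' ', 'a', '/'] = false := by
          simpa using hd
        have hg' : PySem.Chars.startswith l.toList ['d', 'i', 'f', 'f', ' ', '-', '-', 'g', 'i', 't'] = false := by
          simpa using hg
        have hnb : pvNB l = true := by simp [pvNB, pvB_isBoundary, hd', hg']
        simp only [Bool.false_eq_true, if_false]
        rw [ih]
        rw [List.takeWhile_cons_of_pos (by simp [hnb]), List.dropWhile_cons_of_pos (by simp [hnb])]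
        simp

-- ===== B's index-table/slice build equals the reference decomposition =====
-- boundary indices of ls, enumerated from s
def pvBnds (s : Int) (ls : List String) : List Int :=
  ((PySem.List.enumerate ls s).filter fun p => pvB_isBoundary p.2).map (·.1)

theorem pvBnds_nil (s : Int) : pvBnds s [] = [] := by
  simp [pvBnds, PySem.List.enumerate_nil]

theorem pvBnds_cons (s : Int) (l : String) (ls : List String) :
    pvBnds s (l :: ls) =
      (if pvB_isBoundary l then [s] else []) ++ pvBnds (s + 1) ls := by
  by_cases h : pvB_isBoundary l <;>
    simp [pvBnds, PySem.List.enumerate_cons, List.filter, h]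

theorem pvBnds_append_nb (s : Int) (body rest : List String)
    (h : ∀ l ∈ body, pvNB l = true) :
    pvBnds s (body ++ rest) = pvBnds (s + body.length) rest := by
  induction body generalizing s with
  | nil => simp
  | cons x b ih =>
    have hx : pvB_isBoundary x = false := by
      have := h x (by simp)
      simpa [pvNB] using this
    rw [List.cons_append, pvBnds_cons, hx, ih _ (fun l hl => h l (by simp [hl]))]
    simp only [Bool.false_eq_true, if_false, List.nil_append]
    congr 1
    simp only [List.length_cons]
    push_cast
    omega

-- B's per-pair segment
def pvSegOf (clean : List String) (p : Int × Int) : List String :=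
  let ln := (PySem.List.pyGet? clean p.1).getD ""
  if PySem.Str.startswith (PySem.Str.strip ln) "--- a/" then
    pvB_header (PySem.Str.slice (PySem.Str.strip ln) (some 6) none) ::
      PySem.List.slice clean (some p.1) (some p.2)
  else PySem.List.slice clean (some p.1) (some p.2)

theorem pvB_tail_eq (rest : List String) : ∀ (k : Nat) (clean : List String),
    clean.drop k = rest → k + rest.length = clean.length →
    (rest ≠ [] → pvB_isBoundary (rest.headD "") = true) →
    (List.zip (pvBnds (k : Int) rest ++ [(clean.length : Int)])
        (pvBnds (k : Int) rest ++ [(clean.length : Int)]).tail).map (pvSegOf clean) =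
      pvSegTail rest := by
  induction rest using pvSegTail.induct with
  | case1 =>
    intro k clean _ _ _
    simp [pvBnds_nil, pvSegTail]
  | case2 b rest ih =>
    intro k clean hdrop hlen hhead
    have hb : pvB_isBoundary b = true := by simpa using hhead (by simp)
    have hsplit : rest = rest.takeWhile pvNB ++ rest.dropWhile pvNB :=
      (List.takeWhile_append_dropWhile).symm
    have hbodynb : ∀ l ∈ rest.takeWhile pvNB, pvNB l = true := fun l hl =>
      List.mem_takeWhile_imp hl
    have hdropk : clean.drop k = b :: (rest.takeWhile pvNB ++ rest.dropWhile pvNB) := by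
      rw [hdrop, ← hsplit]
    have hget : clean[k]? = some b := by
      have := congrArg List.head? hdropk
      simpa [List.head?_drop] using this
    have hdropk' : clean.drop (k + 1 + (rest.takeWhile pvNB).length) = rest.dropWhile pvNB := by
      rw [show k + 1 + (rest.takeWhile pvNB).length = k + (1 + (rest.takeWhile pvNB).length) from by
        omega, ← List.drop_drop, hdropk,
        show 1 + (rest.takeWhile pvNB).length = (rest.takeWhile pvNB).length + 1 from by omega,
        List.drop_succ_cons, List.drop_left]
    have hlen' : (k + 1 + (rest.takeWhile pvNB).length) + (rest.dropWhile pvNB).length =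
        clean.length := by
      have := congrArg List.length hsplit
      simp only [List.length_append] at this
      simp only [List.length_cons] at hlen
      omega
    have hhead' : rest.dropWhile pvNB ≠ [] →
        pvB_isBoundary ((rest.dropWhile pvNB).headD "") = true := by
      intro hne
      have hnot := List.head?_dropWhile_not pvNB rest
      cases hdw : (rest.dropWhile pvNB) with
      | nil => exact absurd hdw hne
      | cons b' r' =>
        rw [hdw] at hnot
        simp only [List.head?_cons] at hnot
        simpa [pvNB] using hnot
    have hbnds2 : pvBnds ((k : Int) + 1) rest =
        pvBnds ((k + 1 + (rest.takeWhile pvNB).length : Nat) : Int) (rest.dropWhile pvNB) := by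
      rw [hsplit, pvBnds_append_nb _ _ _ hbodynb, ← hsplit]
      congr 1 <;> (push_cast; omega)
    have hL : pvBnds ((k + 1 + (rest.takeWhile pvNB).length : Nat) : Int) (rest.dropWhile pvNB) ++
          [(clean.length : Int)] =
        ((k + 1 + (rest.takeWhile pvNB).length : Nat) : Int) ::
          (pvBnds ((k + 1 + (rest.takeWhile pvNB).length : Nat) : Int) (rest.dropWhile pvNB) ++
            [(clean.length : Int)]).tail := by
      cases hdw : (rest.dropWhile pvNB) with
      | nil =>
        rw [hdw] at hlen'
        simp only [List.length_nil, Nat.add_zero] at hlen'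
        simp [pvBnds_nil, ← hlen']
      | cons b' r' =>
        have hb' : pvB_isBoundary b' = true := by
          have := hhead' (by rw [hdw]; simp)
          rwa [hdw] at this
        rw [pvBnds_cons, hb']
        simp
    have hseg : pvSegOf clean ((k : Int), ((k + 1 + (rest.takeWhile pvNB).length : Nat) : Int)) =
        pvMkSeg b (rest.takeWhile pvNB) := by
      unfold pvSegOf pvMkSeg
      rw [PySem.List.pyGet?_natCast, hget, PySem.List.slice_natCast,
        show (k + 1 + (rest.takeWhile pvNB).length) - k = (rest.takeWhile pvNB).length + 1 from by
          omega, hdropk, List.take_succ_cons, List.take_left]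
      simp
    rw [pvSegTail, pvBnds_cons, hb]
    simp only [if_true, List.cons_append, List.tail_cons, List.nil_append]
    rw [hbnds2, hL, List.zip_cons_cons, List.map_cons, hseg]
    rw [← hL]
    rw [ih _ _ hdropk' hlen' hhead']

theorem pvB_segs_eq (clean : List String) :
    (let cuts := pvBnds 0 clean ++ [(clean.length : Int)]
     let head := PySem.List.slice clean none (some (cuts.headD 0))
     (if head ≠ [] then [head] else []) ++
       (List.zip cuts cuts.tail).map (pvSegOf clean)) = pvSegSpec clean := by
  have hsplit : clean = clean.takeWhile pvNB ++ clean.dropWhile pvNB :=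
    (List.takeWhile_append_dropWhile).symm
  have hprenb : ∀ l ∈ clean.takeWhile pvNB, pvNB l = true := fun l hl =>
    List.mem_takeWhile_imp hl
  have hlen : (clean.takeWhile pvNB).length + (clean.dropWhile pvNB).length = clean.length := by
    rw [← List.length_append, ← hsplit]
  have hhead : clean.dropWhile pvNB ≠ [] →
      pvB_isBoundary ((clean.dropWhile pvNB).headD "") = true := by
    intro hne
    have hnot := List.head?_dropWhile_not pvNB clean
    cases hdw : (clean.dropWhile pvNB) with
    | nil => exact absurd hdw hne
    | cons b' r' =>
      rw [hdw] at hnot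
      simp only [List.head?_cons] at hnot
      simpa [pvNB] using hnot
  have hbnds : pvBnds 0 clean =
      pvBnds (((clean.takeWhile pvNB).length : Nat) : Int) (clean.dropWhile pvNB) := by
    conv_lhs => rw [hsplit]
    rw [pvBnds_append_nb _ _ _ hprenb]
    congr 1 <;> (push_cast; omega)
  have hheadD : (pvBnds 0 clean ++ [(clean.length : Int)]).headD 0 =
      (((clean.takeWhile pvNB).length : Nat) : Int) := by
    rw [hbnds]
    cases hdw : (clean.dropWhile pvNB) with
    | nil =>
      rw [hdw] at hlen
      simp only [List.length_nil, Nat.add_zero] at hlen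
      simp [pvBnds_nil, hlen]
    | cons b' r' =>
      have hb' : pvB_isBoundary b' = true := by
        have := hhead (by rw [hdw]; simp)
        rwa [hdw] at this
      rw [pvBnds_cons, hb']
      simp
  have hslice : PySem.List.slice clean none (some
      ((pvBnds 0 clean ++ [(clean.length : Int)]).headD 0)) = clean.takeWhile pvNB := by
    rw [hheadD, PySem.List.slice_to_natCast]
    have := List.take_left (l₁ := clean.takeWhile pvNB) (l₂ := clean.dropWhile pvNB)
    rwa [← hsplit] at this
  have hzip := pvB_tail_eq (clean.dropWhile pvNB) (clean.takeWhile pvNB).length clean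
    (by have := List.drop_left (l₁ := clean.takeWhile pvNB) (l₂ := clean.dropWhile pvNB)
        rwa [← hsplit] at this) hlen hhead
  simp only []
  rw [hslice, hbnds, hzip, pvSegSpec]
  cases h : clean.takeWhile pvNB with
  | nil => simp
  | cons x xs => simp

-- ===== the path extractions agree =====
theorem pv_path_eq (seg : List String) : pvA_path seg = pvB_path seg := by
  induction seg with
  | nil => rfl
  | cons l rest ih =>
    rw [pvA_path, pv_plus_or]
    cases h : PySem.Str.startswith (PySem.Str.strip l) "+++ b/" with
    | true =>
      have hf := List.find?_cons_of_pos (l := rest)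
        (p := fun l => PySem.Str.startswith (PySem.Str.strip l) "+++ b/") h
      simp only [pvB_path]
      rw [hf]
      simp
    | false =>
      have hf := List.find?_cons_of_neg (l := rest) (a := l)
        (p := fun l => PySem.Str.startswith (PySem.Str.strip l) "+++ b/") (by simpa using h)
      simp only [pvB_path] at ih ⊢
      rw [hf, ← ih]
      simp

-- A's fence-stripping loop is a filter
theorem pv_clean_eq (lines : List String) :
    lines.foldl (fun acc line =>
        if PySem.Str.startswith (PySem.Str.strip line) "```" then acc else acc ++ [line]) [] =
      lines.filter (fun ln => !PySem.Str.startswith (PySem.Str.strip ln) "```") := by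
  have hf : (fun (acc : List String) line =>
      if PySem.Str.startswith (PySem.Str.strip line) "```" then acc else acc ++ [line]) =
      (fun acc line =>
        if (!PySem.Str.startswith (PySem.Str.strip line) "```") = true then
          acc ++ [id line] else acc) := by
    funext acc line
    cases h : PySem.Str.startswith (PySem.Str.strip line) "```" <;> simp [h]
  rw [hf, PySem.List.foldl_append_if]
  simp

-- ===== VERDICT (by name: the statement is the Claim_ definition above) =====
theorem extract_and_split_py_spec : Claim_equal_extract_and_split_py := by
  intro raw _
  show extract_and_split_py raw = extract_and_split_py_alt raw
  unfold extract_and_split_py extract_and_split_py_alt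
  simp only [pv_clean_eq]
  generalize (PySem.Str.splitlines raw).filter
      (fun ln => !PySem.Str.startswith (PySem.Str.strip ln) "```") = clean
  -- A's segments are the reference decomposition
  have hA : (if (clean.foldl pvA_step ([], [])).2 ≠ [] then
        (clean.foldl pvA_step ([], [])).1 ++ [(clean.foldl pvA_step ([], [])).2]
      else (clean.foldl pvA_step ([], [])).1) = pvSegSpec clean := by
    have := pvA_loop_eq clean [] []
    simpa [pvSegSpec] using this
  rw [hA]
  -- B's per-pair loop is a map of pvSegOf
  have hstep : (fun (segs : List (List String)) (p : Int × Int) =>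
      let ln := (PySem.List.pyGet? clean p.1).getD ""
      if PySem.Str.startswith (PySem.Str.strip ln) "--- a/" then
        let path := PySem.Str.slice (PySem.Str.strip ln) (some 6) none
        segs ++ [pvB_header path :: PySem.List.slice clean (some p.1) (some p.2)]
      else
        segs ++ [PySem.List.slice clean (some p.1) (some p.2)]) =
      (fun segs p => segs ++ [pvSegOf clean p]) := by
    funext segs p
    simp only [pvSegOf]
    cases h : PySem.Str.startswith
        (PySem.Str.strip ((PySem.List.pyGet? clean p.1).getD "")) "--- a/" <;> simp [h]
  rw [hstep, PySem.List.foldl_append_singleton_eq_map, List.nil_append]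
  -- B's segments are the reference decomposition
  rw [show (((PySem.List.enumerate clean 0).filter fun p => pvB_isBoundary p.2).map (·.1)) =
      pvBnds 0 clean from rfl]
  have hB := pvB_segs_eq clean
  simp only [] at hB
  rw [hB]
  -- the two result-building folds agree
  have hbuild : (fun (results : List (String × String)) seg =>
      let text := PySem.Str.join "" [PySem.Str.join "\n" seg, "\n"]
      let path := pvA_path seg
      if path ≠ "" then results ++ [(path, text)] else results) =
      (fun results seg =>
        let path := pvB_path seg
        if path ≠ "" then
          results ++ [(path, PySem.Str.join "" [PySem.Str.join "\n" seg, "\n"])]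
        else results) := by
    funext results seg
    simp only [pv_path_eq]
  rw [hbuild]
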